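-- pv_equiv track=rewrite | github.com/pypi-data/pypi-mirror-380 | packages/protein-quest/protein_quest-0.5.0.tar.gz/protein_quest-0.5.0/src/protein_quest/uniprot.py | _flatten_results_emdb
-- ===== SOURCE A (Python) =====
-- from collections.abc import Collection, Iterable
--
-- def _flatten_results_emdb(rawresults: Iterable) -> dict[str, set[str]]:
--     emdb_entries: dict[str, set[str]] = {}
--     for result in rawresults:
--         protein = result["protein"]["value"].split("/")[-1]
--         if "emdb_db" in result:
--             emdb_id = result["emdb_db"]["value"].split("/")[-1]
--             if protein not in emdb_entries:
--                 emdb_entries[protein] = set()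
--             emdb_entries[protein].add(emdb_id)
--     return emdb_entries
-- ===== SOURCE B (Python) =====
-- def _flatten_results_emdb(rawresults):
--     rows = [(result["protein"]["value"], result.get("emdb_db")) for result in rawresults]
--     pairs = [
--         (protein.split("/")[-1], emdb["value"].split("/")[-1])
--         for protein, emdb in rows
--         if emdb is not None
--     ]
--     return {
--         protein: {emdb_id for p, emdb_id in pairs if p == protein}
--         for protein in dict.fromkeys(p for p, _ in pairs)
--     }
-- ===== Notes on version B (the rewrite author's own statement) =====
-- stated objective: alternative
-- what changed: Replaces A's incremental dict-of-sets accumulation (membership test, conditional empty-set insert, in-place add per row) with a pipeline: project (protein_value, optional emdb dict) from every row, build the filtered (protein, emdb_id) pair list, then group it by a dict comprehension over the first-occurrence protein keys.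
import Mathlib
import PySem

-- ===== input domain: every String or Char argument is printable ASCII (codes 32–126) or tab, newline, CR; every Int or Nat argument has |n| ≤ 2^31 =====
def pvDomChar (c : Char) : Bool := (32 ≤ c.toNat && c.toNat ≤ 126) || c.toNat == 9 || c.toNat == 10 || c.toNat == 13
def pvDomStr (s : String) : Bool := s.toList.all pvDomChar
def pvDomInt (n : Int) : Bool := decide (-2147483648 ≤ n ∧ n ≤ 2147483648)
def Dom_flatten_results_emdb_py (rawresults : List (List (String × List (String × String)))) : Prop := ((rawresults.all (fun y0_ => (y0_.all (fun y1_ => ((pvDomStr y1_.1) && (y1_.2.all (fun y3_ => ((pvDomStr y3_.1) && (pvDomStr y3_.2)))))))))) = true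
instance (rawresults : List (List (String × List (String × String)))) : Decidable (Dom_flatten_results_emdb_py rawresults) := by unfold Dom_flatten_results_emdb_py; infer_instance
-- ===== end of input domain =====

-- B replaces A's incremental dict-of-sets accumulation by one filtered (protein, emdb_id) pair list that is
-- then grouped by a comprehension over the first-occurrence protein keys (objective: alternative decomposition).

-- shared helper: port of `s.split("/")[-1]` (split("/") is never empty, so the [-1] IndexError default is unreachable)
def pvLast (s : String) : String := (PySem.List.pyGet? ((PySem.Str.split? s "/").getD []) (-1)).getD ""

-- shared helper: port of `result[k]["value"]` (dict lookup = first match; the defaults are excluded by Pre_)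
def pvVal (r : List (String × List (String × String))) (k : String) : String :=
  (List.lookup "value" ((List.lookup k r).getD [])).getD ""

-- ===== PORT A =====
-- loop body of A: one `for result in rawresults` iteration
def pvStepA (emdb_entries : PySem.Dict String (PySem.Set String))
    (result : List (String × List (String × String))) : PySem.Dict String (PySem.Set String) :=
  let protein := pvLast (pvVal result "protein")
  if (List.lookup "emdb_db" result).isSome then
    let emdb_id := pvLast (pvVal result "emdb_db")
    let entries := if emdb_entries.contains protein then emdb_entries
                   else emdb_entries.insert protein PySem.Set.empty
    entries.modify protein PySem.Set.empty (fun s => PySem.Set.add s emdb_id)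
  else emdb_entries

def flatten_results_emdb_py (rawresults : List (List (String × List (String × String)))) : List (String × List String) :=
  (rawresults.foldl pvStepA PySem.Dict.empty).items

-- ===== PORT B =====
def flatten_results_emdb_py_alt (rawresults : List (List (String × List (String × String)))) : List (String × List String) :=
  let rows := rawresults.map (fun result => (pvVal result "protein", List.lookup "emdb_db" result))
  let pairs := (rows.filter (fun pe => pe.2.isSome)).map
      (fun pe => (pvLast pe.1, pvLast ((List.lookup "value" (pe.2.getD [])).getD "")))
  (PySem.List.dedup (pairs.map Prod.fst)).map
      (fun protein => (protein,
        PySem.Set.ofList ((pairs.filter (fun q => q.1 == protein)).map Prod.snd)))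

-- ===== PRECONDITION & SPEC =====
-- Pre_ = exactly the inputs where Python A returns: every result has result["protein"]["value"],
-- and every result containing "emdb_db" has result["emdb_db"]["value"] (otherwise A raises KeyError).
def Pre_flatten_results_emdb_py (rawresults : List (List (String × List (String × String)))) : Prop :=
  (rawresults.all (fun r =>
    (match List.lookup "protein" r with
     | some pd => (List.lookup "value" pd).isSome
     | none => false)
    &&
    (match List.lookup "emdb_db" r with
     | some ed => (List.lookup "value" ed).isSome
     | none => true))) = true
instance (rawresults : List (List (String × List (String × String)))) : Decidable (Pre_flatten_results_emdb_py rawresults) := by unfold Pre_flatten_results_emdb_py; infer_instance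

def pvWitness_flatten_results_emdb_py : (List (List (String × List (String × String)))) :=
  [[("protein", [("value", "a/P1")]), ("emdb_db", [("value", "e/E1")])],
   [("protein", [("value", "P2")])]]


def Spec_flatten_results_emdb_py (rawresults : List (List (String × List (String × String)))) (out : List (String × List String)) : Prop := out = flatten_results_emdb_py_alt rawresults
instance (rawresults : List (List (String × List (String × String)))) (out : List (String × List String)) : Decidable (Spec_flatten_results_emdb_py rawresults out) := by unfold Spec_flatten_results_emdb_py; infer_instance

-- ===== CLAIM (what is proved, stated in full; the proofs are below) =====
def Claim_equal_flatten_results_emdb_py : Prop := ∀ (rawresults : List (List (String × List (String × String)))), Dom_flatten_results_emdb_py rawresults → Pre_flatten_results_emdb_py rawresults → Spec_flatten_results_emdb_py rawresults (flatten_results_emdb_py rawresults)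


-- ===== LEMMAS AND PROOFS =====

-- the per-(protein, emdb_id) step A performs on its accumulator
def pvStep (d : PySem.Dict String (PySem.Set String)) (pe : String × String) : PySem.Dict String (PySem.Set String) :=
  (if d.contains pe.1 then d else d.insert pe.1 PySem.Set.empty).modify pe.1 PySem.Set.empty
    (fun s => PySem.Set.add s pe.2)

def pvPairs (rawresults : List (List (String × List (String × String)))) : List (String × String) :=
  (rawresults.filter (fun r => (List.lookup "emdb_db" r).isSome)).map
    (fun r => (pvLast (pvVal r "protein"), pvLast (pvVal r "emdb_db")))

def pvG (l : List (String × String)) : List (String × List String) :=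
  (PySem.List.dedup (l.map Prod.fst)).map
    (fun p => (p, PySem.Set.ofList ((l.filter (fun q => q.1 == p)).map Prod.snd)))

lemma pvA_foldl (rawresults : List (List (String × List (String × String))))
    (d : PySem.Dict String (PySem.Set String)) :
    rawresults.foldl pvStepA d = (pvPairs rawresults).foldl pvStep d := by
  induction rawresults generalizing d with
  | nil => rfl
  | cons r rs ih =>
    rw [List.foldl_cons]
    by_cases h : (List.lookup "emdb_db" r).isSome
    · have h1 : pvStepA d r
          = pvStep d (pvLast (pvVal r "protein"), pvLast (pvVal r "emdb_db")) := by
        simp [pvStepA, pvStep, h]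
      have h2 : pvPairs (r :: rs)
          = (pvLast (pvVal r "protein"), pvLast (pvVal r "emdb_db")) :: pvPairs rs := by
        simp [pvPairs, h]
      rw [h1, h2, List.foldl_cons]; exact ih _
    · have h1 : pvStepA d r = d := by simp [pvStepA, h]
      have h2 : pvPairs (r :: rs) = pvPairs rs := by
        simp [pvPairs, h]
      rw [h1, h2]; exact ih _

lemma pv_contains_map (keys : List String) (v : String → PySem.Set String) (p : String) :
    (PySem.Dict.mk (keys.map (fun q => (q, v q)))).contains p = decide (p ∈ keys) := by
  induction keys with
  | nil => simp [PySem.Dict.contains]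
  | cons k ks ih =>
    simp [PySem.Dict.contains, List.any_cons] at ih ⊢
    by_cases h : k = p
    · simp [h]
    · simp [beq_iff_eq, h, Ne.symm h, ih]

lemma pv_getD_map (keys : List String) (v : String → PySem.Set String) (p : String)
    (hp : p ∈ keys) (d0 : PySem.Set String) :
    (PySem.Dict.mk (keys.map (fun q => (q, v q)))).getD p d0 = v p := by
  induction keys with
  | nil => simp at hp
  | cons k ks ih =>
    by_cases h : k = p
    · subst h; simp [PySem.Dict.getD, PySem.Dict.get?]
    · have hp' : p ∈ ks := by
        rcases List.mem_cons.1 hp with h1 | h1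
        · exact absurd h1.symm h
        · exact h1
      simpa [PySem.Dict.getD, PySem.Dict.get?, beq_iff_eq, h] using ih hp'

lemma pv_insert_map_of_mem (keys : List String) (v : String → PySem.Set String) (p : String)
    (hp : p ∈ keys) (w : PySem.Set String) :
    (PySem.Dict.insert (PySem.Dict.mk (keys.map (fun q => (q, v q)))) p w).items
      = keys.map (fun q => (q, if q = p then w else v q)) := by
  have hc : (PySem.Dict.mk (keys.map (fun q => (q, v q)))).contains p = true := by
    rw [pv_contains_map]; simpa using hp
  simp only [PySem.Dict.insert, hc, if_pos]
  simp only [List.map_map]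
  apply List.map_congr_left
  intro q _
  by_cases h : q = p <;> simp [h, beq_iff_eq]

lemma pv_insert_map_of_not_mem (keys : List String) (v : String → PySem.Set String) (p : String)
    (hp : p ∉ keys) (w : PySem.Set String) :
    (PySem.Dict.insert (PySem.Dict.mk (keys.map (fun q => (q, v q)))) p w).items
      = keys.map (fun q => (q, v q)) ++ [(p, w)] := by
  have hc : (PySem.Dict.mk (keys.map (fun q => (q, v q)))).contains p = false := by
    rw [pv_contains_map]; simpa using hp
  simp [PySem.Dict.insert, hc]

lemma pv_dedup_snoc {α : Type} [BEq α] (xs : List α) (a : α) :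
    PySem.List.dedup (xs ++ [a]) = PySem.Set.add (PySem.List.dedup xs) a := by
  simp [PySem.List.dedup, PySem.Set.ofList, List.foldl_append]

lemma pv_ofList_snoc {α : Type} [BEq α] (xs : List α) (a : α) :
    PySem.Set.ofList (xs ++ [a]) = PySem.Set.add (PySem.Set.ofList xs) a := by
  simp [PySem.Set.ofList, List.foldl_append]

lemma pv_filter_eq_nil (l : List (String × String)) (p : String)
    (hp : p ∉ l.map Prod.fst) :
    l.filter (fun q => q.1 == p) = [] := by
  rw [List.filter_eq_nil_iff]
  intro q hq
  simp only [beq_iff_eq]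
  intro h
  exact hp (by simpa [← h] using List.mem_map_of_mem (f := Prod.fst) hq)

lemma pv_step_G (l : List (String × String)) (pe : String × String) :
    (pvStep (PySem.Dict.mk (pvG l)) pe).items = pvG (l ++ [pe]) := by
  obtain ⟨p, e⟩ := pe
  have hkeys : pvG l = (PySem.List.dedup (l.map Prod.fst)).map
      (fun q => (q, PySem.Set.ofList ((l.filter (fun r => r.1 == q)).map Prod.snd))) := rfl
  set keys := PySem.List.dedup (l.map Prod.fst) with hk
  set v : String → PySem.Set String :=
    fun q => PySem.Set.ofList ((l.filter (fun r => r.1 == q)).map Prod.snd) with hv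
  have hmemkeys : ∀ x, x ∈ keys ↔ x ∈ l.map Prod.fst := by
    intro x; rw [hk]; exact PySem.List.mem_dedup _ _
  by_cases hp : p ∈ l.map Prod.fst
  · -- key already present: A keeps the dict and adds e to the existing set
    have hpk : p ∈ keys := (hmemkeys p).2 hp
    have hc : (PySem.Dict.mk (pvG l)).contains p = true := by
      rw [hkeys, pv_contains_map]; simpa using hpk
    have hG : pvG (l ++ [(p, e)]) = keys.map
        (fun q => (q, if q = p then PySem.Set.add (v q) e else v q)) := by
      unfold pvG
      rw [List.map_append, ← hk.symm]
      have : PySem.List.dedup (l.map Prod.fst ++ [p]) = keys := by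
        rw [pv_dedup_snoc, ← hk, PySem.Set.add]
        simp [PySem.Set.contains, hpk]
      rw [List.map_singleton, this]
      apply List.map_congr_left
      intro q hq
      rw [List.filter_append]
      by_cases h : q = p
      · subst h
        simp [List.filter, List.map_append, pv_ofList_snoc, hv]
      · have : ¬ ((p, e).1 == q) = true := by simpa [beq_iff_eq] using Ne.symm h
        simp [List.filter, this, h, hv]
    rw [hG]
    simp only [pvStep, hc, if_pos, PySem.Dict.modify]
    have hget : (PySem.Dict.mk (pvG l)).getD p PySem.Set.empty = v p := by
      rw [hkeys]; exact pv_getD_map keys v p hpk _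
    rw [hget, hkeys, pv_insert_map_of_mem keys v p hpk]
    apply List.map_congr_left
    intro q _
    by_cases h : q = p <;> simp [h]
  · -- new key: A appends (p, ∅) then adds e; B appends the key to the dedup list
    have hpk : p ∉ keys := fun h => hp ((hmemkeys p).1 h)
    have hc : (PySem.Dict.mk (pvG l)).contains p = false := by
      rw [hkeys, pv_contains_map]; simpa using hpk
    have hnil : l.filter (fun q => q.1 == p) = [] := pv_filter_eq_nil l p hp
    have hG : pvG (l ++ [(p, e)]) = keys.map (fun q => (q, v q)) ++ [(p, [e])] := by
      unfold pvG
      rw [List.map_append, ← hk.symm, List.map_singleton]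
      have hded : PySem.List.dedup (l.map Prod.fst ++ [p]) = keys ++ [p] := by
        rw [pv_dedup_snoc, ← hk, PySem.Set.add]
        simp [PySem.Set.contains, hpk]
      rw [hded, List.map_append, List.map_singleton]
      congr 1
      · apply List.map_congr_left
        intro q hq
        rw [List.filter_append]
        have hqp : q ≠ p := fun h => hpk (h ▸ hq)
        have : ¬ ((p, e).1 == q) = true := by simpa [beq_iff_eq] using Ne.symm hqp
        simp [List.filter, this, hv]
      · rw [List.filter_append, hnil]
        simp [List.filter, PySem.Set.ofList, PySem.Set.add, PySem.Set.empty, PySem.Set.contains]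
    rw [hG]
    simp only [pvStep, hc, Bool.false_eq_true, if_neg, not_false_iff, PySem.Dict.modify]
    -- after inserting (p, ∅) the dict is (keys ++ [p]).map with extended v
    have hins : (PySem.Dict.insert (PySem.Dict.mk (pvG l)) p PySem.Set.empty).items
        = (keys ++ [p]).map (fun q => (q, if q = p then PySem.Set.empty else v q)) := by
      rw [hkeys, pv_insert_map_of_not_mem keys v p hpk]
      rw [List.map_append, List.map_singleton, if_pos rfl]
      congr 1
      apply List.map_congr_left
      intro q hq
      have hqp : q ≠ p := fun h => hpk (h ▸ hq)
      simp [hqp]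
    set v' : String → PySem.Set String := fun q => if q = p then PySem.Set.empty else v q with hv'
    have hins' : PySem.Dict.insert (PySem.Dict.mk (pvG l)) p PySem.Set.empty
        = PySem.Dict.mk ((keys ++ [p]).map (fun q => (q, v' q))) := by
      cases hD : PySem.Dict.insert (PySem.Dict.mk (pvG l)) p PySem.Set.empty with
      | mk items =>
        rw [hD] at hins
        simpa [hv', List.map_append] using hins
    rw [hins']
    have hpk' : p ∈ keys ++ [p] := by simp
    rw [pv_getD_map (keys ++ [p]) v' p hpk']
    rw [pv_insert_map_of_mem (keys ++ [p]) v' p hpk']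
    rw [List.map_append, List.map_singleton, if_pos rfl]
    congr 1
    · apply List.map_congr_left
      intro q hq
      have hqp : q ≠ p := fun h => hpk (h ▸ hq)
      simp [hqp, hv']
    · simp [hv', PySem.Set.add, PySem.Set.empty, PySem.Set.contains]

lemma pv_foldl_G (l : List (String × String)) :
    (l.foldl pvStep PySem.Dict.empty).items = pvG l := by
  induction l using List.reverseRecOn with
  | nil => rfl
  | append_singleton l pe ih =>
    rw [List.foldl_append, List.foldl_cons, List.foldl_nil]
    have : l.foldl pvStep PySem.Dict.empty = PySem.Dict.mk (pvG l) := by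
      cases hD : l.foldl pvStep PySem.Dict.empty with
      | mk items => simpa [hD] using ih
    rw [this, pv_step_G]

-- B's projection-then-filter pipeline produces exactly the (protein, emdb_id) pairs of pvPairs
lemma pvB_pairs (rawresults : List (List (String × List (String × String)))) :
    ((rawresults.map (fun result => (pvVal result "protein", List.lookup "emdb_db" result))).filter
        (fun pe => pe.2.isSome)).map
      (fun pe => (pvLast pe.1, pvLast ((List.lookup "value" (pe.2.getD [])).getD "")))
    = pvPairs rawresults := by
  induction rawresults with
  | nil => rfl
  | cons r rs ih =>
    cases h : List.lookup "emdb_db" r with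
    | none => simpa [pvPairs, List.filter_cons, h] using ih
    | some e => simpa [pvPairs, pvVal, List.filter_cons, h] using ih

lemma pvAlt_eq (rawresults : List (List (String × List (String × String)))) :
    flatten_results_emdb_py_alt rawresults = pvG (pvPairs rawresults) := by
  simp only [flatten_results_emdb_py_alt, pvG, pvB_pairs]

-- ===== VERDICT (by name: the statement is the Claim_ definition above) =====
theorem flatten_results_emdb_py_spec : Claim_equal_flatten_results_emdb_py := by
  intro rawresults _ _
  unfold Spec_flatten_results_emdb_py flatten_results_emdb_py
  rw [pvA_foldl, pv_foldl_G, pvAlt_eq]
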